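-- pv_equiv track=rewrite | github.com/alexandraback/datacollection | solutions_5648941810974720_1/Python/paimon/first.py | solve
-- ===== SOURCE A (Python) =====
-- from collections import Counter, defaultdict
--
-- def solve(s):
--     counter = Counter(s)
--     names = ["ZERO", "ONE", "TWO", "THREE", "FOUR", "FIVE", "SIX", "SEVEN", "EIGHT", "NINE"]
--     letter_to_digits = defaultdict(set)
--     for i, name in enumerate(names):
--         for c in name:
--             letter_to_digits[c].add(i)
--     done, result = 0, []
--     for _ in range(10):
--         letter = next(letter for letter, digits in letter_to_digits.items() if len(digits) == 1)
--         digit = letter_to_digits[letter].pop()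
--         count = counter[letter] // names[digit].count(letter)
--         result.extend([digit] * count)
--         for c in names[digit]:
--             counter[c] -= count
--             if digit in letter_to_digits[c]:
--                 letter_to_digits[c].remove(digit)
--     return ''.join(str(d) for d in sorted(result))
-- ===== SOURCE B (Python) =====
-- from collections import Counter
--
-- def solve(s):
--     c = Counter(s)
--     zeros  = c['Z']
--     twos   = c['W']
--     fours  = c['U']
--     threes = c['R'] - zeros - fours
--     ones   = c['O'] - zeros - twos - fours
--     eights = c['T'] - twos - threes
--     fives  = c['F'] - fours
--     sevens = c['V'] - fives
--     nines  = c['E'] - zeros - ones - 2*threes - fives - 2*sevens - eights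
--     sixes  = c['I'] - fives - eights - nines
--     counts = [zeros, ones, twos, threes, fours, fives, sixes, sevens, eights, nines]
--     return ''.join(str(d) * counts[d] for d in range(10))
-- ===== Notes on version B (the rewrite author's own statement) =====
-- stated objective: simpler
-- what changed: A builds a defaultdict letter->digit-set index and runs a 10-iteration search-and-eliminate loop over it, then sorts the collected digits; since A's resolution order and identifying letters are fixed and input-independent, B computes the ten digit counts directly by straight-line arithmetic on a single Counter and emits the digits in ascending order without any search or sort.
import Mathlib
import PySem

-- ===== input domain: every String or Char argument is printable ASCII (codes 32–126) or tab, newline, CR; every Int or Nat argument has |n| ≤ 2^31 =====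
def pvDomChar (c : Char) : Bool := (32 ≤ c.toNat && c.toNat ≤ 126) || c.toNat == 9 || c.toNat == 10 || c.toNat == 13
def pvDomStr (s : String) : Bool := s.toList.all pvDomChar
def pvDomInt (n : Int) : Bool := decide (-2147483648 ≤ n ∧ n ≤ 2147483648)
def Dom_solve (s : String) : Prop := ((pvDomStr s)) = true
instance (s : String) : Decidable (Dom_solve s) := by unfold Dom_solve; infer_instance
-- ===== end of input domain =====

-- B replaces A's defaultdict-of-sets index and 10-iteration elimination search by a direct
-- straight-line computation of the ten digit counts (simpler, no search loop); equivalence of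
-- the return values is proved on all of Dom_solve.

-- ===== PORT A =====
-- step of A's elimination loop; `next(...)` always finds a letter here (the index evolution is
-- input-independent), the `none` branch is only a totality guard; set.pop() on the found
-- singleton set is its sole element (deterministic, hash order irrelevant).
def solveStep (names : List String)
    (st : PySem.Dict Char Int × PySem.Dict Char (PySem.Set Int) × List Int) :
    PySem.Dict Char Int × PySem.Dict Char (PySem.Set Int) × List Int :=
  let counter := st.1
  let ltd := st.2.1
  let result := st.2.2
  match ltd.items.find? (fun p => p.2.length == 1) with
  | none => (counter, ltd, result)   -- Python would raise StopIteration; never reached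
  | some p =>
    let letter := p.1
    let digit := (ltd.getD letter []).headD 0
    let ltd := ltd.insert letter (PySem.Set.discard (ltd.getD letter []) digit)  -- .pop()
    let name := PySem.List.pyGetD names digit ""
    let count := PySem.Int.floordiv (counter.getD letter 0)
                   ((PySem.Str.count name (String.ofList [letter]) : Int))
    let result := result ++ PySem.List.pyRepeat [digit] count
    let cl := name.toList.foldl
      (fun (cl : PySem.Dict Char Int × PySem.Dict Char (PySem.Set Int)) c =>
        let counter := cl.1.insert c (cl.1.getD c 0 - count)
        let ltd := if PySem.Set.contains (cl.2.getD c []) digit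
                   then cl.2.insert c (PySem.Set.discard (cl.2.getD c []) digit)
                   else cl.2
        (counter, ltd))
      (counter, ltd)
    (cl.1, cl.2, result)

def solve (s : String) : String :=
  let counter := PySem.Dict.counter s.toList
  let names : List String := ["ZERO","ONE","TWO","THREE","FOUR","FIVE","SIX","SEVEN","EIGHT","NINE"]
  let ltd : PySem.Dict Char (PySem.Set Int) :=
    (PySem.List.enumerate names 0).foldl
      (fun d p => p.2.toList.foldl
        (fun d c => d.modify c [] (fun st => PySem.Set.add st p.1)) d)
      PySem.Dict.empty
  let _done : Int := 0
  let st := (PySem.List.pyRange 0 10 1).foldl (fun st _ => solveStep names st)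
              (counter, ltd, ([] : List Int))
  PySem.Str.join "" ((PySem.List.sorted st.2.2 (fun x => x) false).map PySem.Int.toStr)

-- ===== PORT B =====
def solve_alt (s : String) : String :=
  let c := PySem.Dict.counter s.toList
  let zeros  := c.getD 'Z' 0
  let twos   := c.getD 'W' 0
  let fours  := c.getD 'U' 0
  let threes := c.getD 'R' 0 - zeros - fours
  let ones   := c.getD 'O' 0 - zeros - twos - fours
  let eights := c.getD 'T' 0 - twos - threes
  let fives  := c.getD 'F' 0 - fours
  let sevens := c.getD 'V' 0 - fives
  let nines  := c.getD 'E' 0 - zeros - ones - 2*threes - fives - 2*sevens - eights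
  let sixes  := c.getD 'I' 0 - fives - eights - nines
  let counts : List Int := [zeros, ones, twos, threes, fours, fives, sixes, sevens, eights, nines]
  PySem.Str.join "" ((PySem.List.pyRange 0 10 1).map (fun d =>
    String.ofList (PySem.List.pyRepeat (PySem.Int.toChars d) (PySem.List.pyGetD counts d 0))))

-- ===== PRECONDITION & SPEC =====
def Spec_solve (s : String) (out : String) : Prop := out = solve_alt s
instance (s : String) (out : String) : Decidable (Spec_solve s out) := by unfold Spec_solve; infer_instance

-- ===== CLAIM (what is proved, stated in full; the proofs are below) =====
def Claim_equal_solve : Prop := ∀ (s : String), Dom_solve s → Spec_solve s (solve s)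

-- ===== LEMMAS AND PROOFS =====
-- A's letter->digits index and its evolution are input-independent; pvLtd0..pvLtd10 are its
-- ten states, pvStep0..pvStep9 evaluate one loop iteration each with the counter symbolic.
def pvNames : List String := ["ZERO", "ONE", "TWO", "THREE", "FOUR", "FIVE", "SIX", "SEVEN", "EIGHT", "NINE"]

def pvLtd0 : PySem.Dict Char (PySem.Set Int) := PySem.Dict.mk [('Z', ([0] : PySem.Set Int)), ('E', ([0, 1, 3, 5, 7, 8, 9] : PySem.Set Int)), ('R', ([0, 3, 4] : PySem.Set Int)), ('O', ([0, 1, 2, 4] : PySem.Set Int)), ('N', ([1, 7, 9] : PySem.Set Int)), ('T', ([2, 3, 8] : PySem.Set Int)), ('W', ([2] : PySem.Set Int)), ('H', ([3, 8] : PySem.Set Int)), ('F', ([4, 5] : PySem.Set Int)), ('U', ([4] : PySem.Set Int)), ('I', ([5, 6, 8, 9] : PySem.Set Int)), ('V', ([5, 7] : PySem.Set Int)), ('S', ([6, 7] : PySem.Set Int)), ('X', ([6] : PySem.Set Int)), ('G', ([8] : PySem.Set Int))]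

def pvLtd1 : PySem.Dict Char (PySem.Set Int) := PySem.Dict.mk [('Z', ([] : PySem.Set Int)), ('E', ([1, 3, 5, 7, 8, 9] : PySem.Set Int)), ('R', ([3, 4] : PySem.Set Int)), ('O', ([1, 2, 4] : PySem.Set Int)), ('N', ([1, 7, 9] : PySem.Set Int)), ('T', ([2, 3, 8] : PySem.Set Int)), ('W', ([2] : PySem.Set Int)), ('H', ([3, 8] : PySem.Set Int)), ('F', ([4, 5] : PySem.Set Int)), ('U', ([4] : PySem.Set Int)), ('I', ([5, 6, 8, 9] : PySem.Set Int)), ('V', ([5, 7] : PySem.Set Int)), ('S', ([6, 7] : PySem.Set Int)), ('X', ([6] : PySem.Set Int)), ('G', ([8] : PySem.Set Int))]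

def pvLtd2 : PySem.Dict Char (PySem.Set Int) := PySem.Dict.mk [('Z', ([] : PySem.Set Int)), ('E', ([1, 3, 5, 7, 8, 9] : PySem.Set Int)), ('R', ([3, 4] : PySem.Set Int)), ('O', ([1, 4] : PySem.Set Int)), ('N', ([1, 7, 9] : PySem.Set Int)), ('T', ([3, 8] : PySem.Set Int)), ('W', ([] : PySem.Set Int)), ('H', ([3, 8] : PySem.Set Int)), ('F', ([4, 5] : PySem.Set Int)), ('U', ([4] : PySem.Set Int)), ('I', ([5, 6, 8, 9] : PySem.Set Int)), ('V', ([5, 7] : PySem.Set Int)), ('S', ([6, 7] : PySem.Set Int)), ('X', ([6] : PySem.Set Int)), ('G', ([8] : PySem.Set Int))]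

def pvLtd3 : PySem.Dict Char (PySem.Set Int) := PySem.Dict.mk [('Z', ([] : PySem.Set Int)), ('E', ([1, 3, 5, 7, 8, 9] : PySem.Set Int)), ('R', ([3] : PySem.Set Int)), ('O', ([1] : PySem.Set Int)), ('N', ([1, 7, 9] : PySem.Set Int)), ('T', ([3, 8] : PySem.Set Int)), ('W', ([] : PySem.Set Int)), ('H', ([3, 8] : PySem.Set Int)), ('F', ([5] : PySem.Set Int)), ('U', ([] : PySem.Set Int)), ('I', ([5, 6, 8, 9] : PySem.Set Int)), ('V', ([5, 7] : PySem.Set Int)), ('S', ([6, 7] : PySem.Set Int)), ('X', ([6] : PySem.Set Int)), ('G', ([8] : PySem.Set Int))]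

def pvLtd4 : PySem.Dict Char (PySem.Set Int) := PySem.Dict.mk [('Z', ([] : PySem.Set Int)), ('E', ([1, 5, 7, 8, 9] : PySem.Set Int)), ('R', ([] : PySem.Set Int)), ('O', ([1] : PySem.Set Int)), ('N', ([1, 7, 9] : PySem.Set Int)), ('T', ([8] : PySem.Set Int)), ('W', ([] : PySem.Set Int)), ('H', ([8] : PySem.Set Int)), ('F', ([5] : PySem.Set Int)), ('U', ([] : PySem.Set Int)), ('I', ([5, 6, 8, 9] : PySem.Set Int)), ('V', ([5, 7] : PySem.Set Int)), ('S', ([6, 7] : PySem.Set Int)), ('X', ([6] : PySem.Set Int)), ('G', ([8] : PySem.Set Int))]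

def pvLtd5 : PySem.Dict Char (PySem.Set Int) := PySem.Dict.mk [('Z', ([] : PySem.Set Int)), ('E', ([5, 7, 8, 9] : PySem.Set Int)), ('R', ([] : PySem.Set Int)), ('O', ([] : PySem.Set Int)), ('N', ([7, 9] : PySem.Set Int)), ('T', ([8] : PySem.Set Int)), ('W', ([] : PySem.Set Int)), ('H', ([8] : PySem.Set Int)), ('F', ([5] : PySem.Set Int)), ('U', ([] : PySem.Set Int)), ('I', ([5, 6, 8, 9] : PySem.Set Int)), ('V', ([5, 7] : PySem.Set Int)), ('S', ([6, 7] : PySem.Set Int)), ('X', ([6] : PySem.Set Int)), ('G', ([8] : PySem.Set Int))]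

def pvLtd6 : PySem.Dict Char (PySem.Set Int) := PySem.Dict.mk [('Z', ([] : PySem.Set Int)), ('E', ([5, 7, 9] : PySem.Set Int)), ('R', ([] : PySem.Set Int)), ('O', ([] : PySem.Set Int)), ('N', ([7, 9] : PySem.Set Int)), ('T', ([] : PySem.Set Int)), ('W', ([] : PySem.Set Int)), ('H', ([] : PySem.Set Int)), ('F', ([5] : PySem.Set Int)), ('U', ([] : PySem.Set Int)), ('I', ([5, 6, 9] : PySem.Set Int)), ('V', ([5, 7] : PySem.Set Int)), ('S', ([6, 7] : PySem.Set Int)), ('X', ([6] : PySem.Set Int)), ('G', ([] : PySem.Set Int))]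

def pvLtd7 : PySem.Dict Char (PySem.Set Int) := PySem.Dict.mk [('Z', ([] : PySem.Set Int)), ('E', ([7, 9] : PySem.Set Int)), ('R', ([] : PySem.Set Int)), ('O', ([] : PySem.Set Int)), ('N', ([7, 9] : PySem.Set Int)), ('T', ([] : PySem.Set Int)), ('W', ([] : PySem.Set Int)), ('H', ([] : PySem.Set Int)), ('F', ([] : PySem.Set Int)), ('U', ([] : PySem.Set Int)), ('I', ([6, 9] : PySem.Set Int)), ('V', ([7] : PySem.Set Int)), ('S', ([6, 7] : PySem.Set Int)), ('X', ([6] : PySem.Set Int)), ('G', ([] : PySem.Set Int))]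

def pvLtd8 : PySem.Dict Char (PySem.Set Int) := PySem.Dict.mk [('Z', ([] : PySem.Set Int)), ('E', ([9] : PySem.Set Int)), ('R', ([] : PySem.Set Int)), ('O', ([] : PySem.Set Int)), ('N', ([9] : PySem.Set Int)), ('T', ([] : PySem.Set Int)), ('W', ([] : PySem.Set Int)), ('H', ([] : PySem.Set Int)), ('F', ([] : PySem.Set Int)), ('U', ([] : PySem.Set Int)), ('I', ([6, 9] : PySem.Set Int)), ('V', ([] : PySem.Set Int)), ('S', ([6] : PySem.Set Int)), ('X', ([6] : PySem.Set Int)), ('G', ([] : PySem.Set Int))]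

def pvLtd9 : PySem.Dict Char (PySem.Set Int) := PySem.Dict.mk [('Z', ([] : PySem.Set Int)), ('E', ([] : PySem.Set Int)), ('R', ([] : PySem.Set Int)), ('O', ([] : PySem.Set Int)), ('N', ([] : PySem.Set Int)), ('T', ([] : PySem.Set Int)), ('W', ([] : PySem.Set Int)), ('H', ([] : PySem.Set Int)), ('F', ([] : PySem.Set Int)), ('U', ([] : PySem.Set Int)), ('I', ([6] : PySem.Set Int)), ('V', ([] : PySem.Set Int)), ('S', ([6] : PySem.Set Int)), ('X', ([6] : PySem.Set Int)), ('G', ([] : PySem.Set Int))]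

def pvLtd10 : PySem.Dict Char (PySem.Set Int) := PySem.Dict.mk [('Z', ([] : PySem.Set Int)), ('E', ([] : PySem.Set Int)), ('R', ([] : PySem.Set Int)), ('O', ([] : PySem.Set Int)), ('N', ([] : PySem.Set Int)), ('T', ([] : PySem.Set Int)), ('W', ([] : PySem.Set Int)), ('H', ([] : PySem.Set Int)), ('F', ([] : PySem.Set Int)), ('U', ([] : PySem.Set Int)), ('I', ([] : PySem.Set Int)), ('V', ([] : PySem.Set Int)), ('S', ([] : PySem.Set Int)), ('X', ([] : PySem.Set Int)), ('G', ([] : PySem.Set Int))]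

def pvDec (d : PySem.Dict Char Int) (cs : List Char) (k : Int) : PySem.Dict Char Int :=
  cs.foldl (fun d c => d.insert c (d.getD c 0 - k)) d

lemma pvStep0 (counter : PySem.Dict Char Int) (result : List Int) :
    solveStep pvNames (counter, pvLtd0, result) =
    (pvDec counter ['Z', 'E', 'R', 'O'] (PySem.Int.floordiv (counter.getD 'Z' 0) 1), pvLtd1,
      result ++ PySem.List.pyRepeat [0] (PySem.Int.floordiv (counter.getD 'Z' 0) 1)) := by
  simp only [solveStep]
  rw [show pvLtd0.items.find? (fun p => p.2.length == 1) = some ('Z', ([0] : PySem.Set Int)) from rfl]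
  simp only []
  rw [show ((pvLtd0.getD 'Z' []).headD 0 : Int) = 0 from rfl]
  rw [show PySem.List.pyGetD pvNames (0 : Int) "" = "ZERO" from rfl]
  rw [show PySem.Str.count "ZERO" (String.ofList ['Z']) = 1 from rfl]
  rw [show "ZERO".toList = ['Z', 'E', 'R', 'O'] from rfl]
  rw [PySem.List.foldl_prod_mk
      (f := fun (a : PySem.Dict Char Int) (c : Char) =>
        a.insert c (a.getD c 0 - PySem.Int.floordiv (counter.getD 'Z' 0) ((1:Nat) : Int)))
      (g := fun (b : PySem.Dict Char (PySem.Set Int)) (c : Char) =>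
        if PySem.Set.contains (b.getD c []) (0 : Int)
        then b.insert c (PySem.Set.discard (b.getD c []) (0 : Int)) else b)]
  refine Prod.ext ?_ (Prod.ext ?_ ?_)
  · rfl
  · show List.foldl _ _ _ = pvLtd1
    decide
  · rfl

lemma pvStep1 (counter : PySem.Dict Char Int) (result : List Int) :
    solveStep pvNames (counter, pvLtd1, result) =
    (pvDec counter ['T', 'W', 'O'] (PySem.Int.floordiv (counter.getD 'W' 0) 1), pvLtd2,
      result ++ PySem.List.pyRepeat [2] (PySem.Int.floordiv (counter.getD 'W' 0) 1)) := by
  simp only [solveStep]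
  rw [show pvLtd1.items.find? (fun p => p.2.length == 1) = some ('W', ([2] : PySem.Set Int)) from rfl]
  simp only []
  rw [show ((pvLtd1.getD 'W' []).headD 0 : Int) = 2 from rfl]
  rw [show PySem.List.pyGetD pvNames (2 : Int) "" = "TWO" from rfl]
  rw [show PySem.Str.count "TWO" (String.ofList ['W']) = 1 from rfl]
  rw [show "TWO".toList = ['T', 'W', 'O'] from rfl]
  rw [PySem.List.foldl_prod_mk
      (f := fun (a : PySem.Dict Char Int) (c : Char) =>
        a.insert c (a.getD c 0 - PySem.Int.floordiv (counter.getD 'W' 0) ((1:Nat) : Int)))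
      (g := fun (b : PySem.Dict Char (PySem.Set Int)) (c : Char) =>
        if PySem.Set.contains (b.getD c []) (2 : Int)
        then b.insert c (PySem.Set.discard (b.getD c []) (2 : Int)) else b)]
  refine Prod.ext ?_ (Prod.ext ?_ ?_)
  · rfl
  · show List.foldl _ _ _ = pvLtd2
    decide
  · rfl

lemma pvStep2 (counter : PySem.Dict Char Int) (result : List Int) :
    solveStep pvNames (counter, pvLtd2, result) =
    (pvDec counter ['F', 'O', 'U', 'R'] (PySem.Int.floordiv (counter.getD 'U' 0) 1), pvLtd3,
      result ++ PySem.List.pyRepeat [4] (PySem.Int.floordiv (counter.getD 'U' 0) 1)) := by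
  simp only [solveStep]
  rw [show pvLtd2.items.find? (fun p => p.2.length == 1) = some ('U', ([4] : PySem.Set Int)) from rfl]
  simp only []
  rw [show ((pvLtd2.getD 'U' []).headD 0 : Int) = 4 from rfl]
  rw [show PySem.List.pyGetD pvNames (4 : Int) "" = "FOUR" from rfl]
  rw [show PySem.Str.count "FOUR" (String.ofList ['U']) = 1 from rfl]
  rw [show "FOUR".toList = ['F', 'O', 'U', 'R'] from rfl]
  rw [PySem.List.foldl_prod_mk
      (f := fun (a : PySem.Dict Char Int) (c : Char) =>
        a.insert c (a.getD c 0 - PySem.Int.floordiv (counter.getD 'U' 0) ((1:Nat) : Int)))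
      (g := fun (b : PySem.Dict Char (PySem.Set Int)) (c : Char) =>
        if PySem.Set.contains (b.getD c []) (4 : Int)
        then b.insert c (PySem.Set.discard (b.getD c []) (4 : Int)) else b)]
  refine Prod.ext ?_ (Prod.ext ?_ ?_)
  · rfl
  · show List.foldl _ _ _ = pvLtd3
    decide
  · rfl

lemma pvStep3 (counter : PySem.Dict Char Int) (result : List Int) :
    solveStep pvNames (counter, pvLtd3, result) =
    (pvDec counter ['T', 'H', 'R', 'E', 'E'] (PySem.Int.floordiv (counter.getD 'R' 0) 1), pvLtd4,
      result ++ PySem.List.pyRepeat [3] (PySem.Int.floordiv (counter.getD 'R' 0) 1)) := by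
  simp only [solveStep]
  rw [show pvLtd3.items.find? (fun p => p.2.length == 1) = some ('R', ([3] : PySem.Set Int)) from rfl]
  simp only []
  rw [show ((pvLtd3.getD 'R' []).headD 0 : Int) = 3 from rfl]
  rw [show PySem.List.pyGetD pvNames (3 : Int) "" = "THREE" from rfl]
  rw [show PySem.Str.count "THREE" (String.ofList ['R']) = 1 from rfl]
  rw [show "THREE".toList = ['T', 'H', 'R', 'E', 'E'] from rfl]
  rw [PySem.List.foldl_prod_mk
      (f := fun (a : PySem.Dict Char Int) (c : Char) =>
        a.insert c (a.getD c 0 - PySem.Int.floordiv (counter.getD 'R' 0) ((1:Nat) : Int)))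
      (g := fun (b : PySem.Dict Char (PySem.Set Int)) (c : Char) =>
        if PySem.Set.contains (b.getD c []) (3 : Int)
        then b.insert c (PySem.Set.discard (b.getD c []) (3 : Int)) else b)]
  refine Prod.ext ?_ (Prod.ext ?_ ?_)
  · rfl
  · show List.foldl _ _ _ = pvLtd4
    decide
  · rfl

lemma pvStep4 (counter : PySem.Dict Char Int) (result : List Int) :
    solveStep pvNames (counter, pvLtd4, result) =
    (pvDec counter ['O', 'N', 'E'] (PySem.Int.floordiv (counter.getD 'O' 0) 1), pvLtd5,
      result ++ PySem.List.pyRepeat [1] (PySem.Int.floordiv (counter.getD 'O' 0) 1)) := by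
  simp only [solveStep]
  rw [show pvLtd4.items.find? (fun p => p.2.length == 1) = some ('O', ([1] : PySem.Set Int)) from rfl]
  simp only []
  rw [show ((pvLtd4.getD 'O' []).headD 0 : Int) = 1 from rfl]
  rw [show PySem.List.pyGetD pvNames (1 : Int) "" = "ONE" from rfl]
  rw [show PySem.Str.count "ONE" (String.ofList ['O']) = 1 from rfl]
  rw [show "ONE".toList = ['O', 'N', 'E'] from rfl]
  rw [PySem.List.foldl_prod_mk
      (f := fun (a : PySem.Dict Char Int) (c : Char) =>
        a.insert c (a.getD c 0 - PySem.Int.floordiv (counter.getD 'O' 0) ((1:Nat) : Int)))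
      (g := fun (b : PySem.Dict Char (PySem.Set Int)) (c : Char) =>
        if PySem.Set.contains (b.getD c []) (1 : Int)
        then b.insert c (PySem.Set.discard (b.getD c []) (1 : Int)) else b)]
  refine Prod.ext ?_ (Prod.ext ?_ ?_)
  · rfl
  · show List.foldl _ _ _ = pvLtd5
    decide
  · rfl

lemma pvStep5 (counter : PySem.Dict Char Int) (result : List Int) :
    solveStep pvNames (counter, pvLtd5, result) =
    (pvDec counter ['E', 'I', 'G', 'H', 'T'] (PySem.Int.floordiv (counter.getD 'T' 0) 1), pvLtd6,
      result ++ PySem.List.pyRepeat [8] (PySem.Int.floordiv (counter.getD 'T' 0) 1)) := by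
  simp only [solveStep]
  rw [show pvLtd5.items.find? (fun p => p.2.length == 1) = some ('T', ([8] : PySem.Set Int)) from rfl]
  simp only []
  rw [show ((pvLtd5.getD 'T' []).headD 0 : Int) = 8 from rfl]
  rw [show PySem.List.pyGetD pvNames (8 : Int) "" = "EIGHT" from rfl]
  rw [show PySem.Str.count "EIGHT" (String.ofList ['T']) = 1 from rfl]
  rw [show "EIGHT".toList = ['E', 'I', 'G', 'H', 'T'] from rfl]
  rw [PySem.List.foldl_prod_mk
      (f := fun (a : PySem.Dict Char Int) (c : Char) =>
        a.insert c (a.getD c 0 - PySem.Int.floordiv (counter.getD 'T' 0) ((1:Nat) : Int)))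
      (g := fun (b : PySem.Dict Char (PySem.Set Int)) (c : Char) =>
        if PySem.Set.contains (b.getD c []) (8 : Int)
        then b.insert c (PySem.Set.discard (b.getD c []) (8 : Int)) else b)]
  refine Prod.ext ?_ (Prod.ext ?_ ?_)
  · rfl
  · show List.foldl _ _ _ = pvLtd6
    decide
  · rfl

lemma pvStep6 (counter : PySem.Dict Char Int) (result : List Int) :
    solveStep pvNames (counter, pvLtd6, result) =
    (pvDec counter ['F', 'I', 'V', 'E'] (PySem.Int.floordiv (counter.getD 'F' 0) 1), pvLtd7,
      result ++ PySem.List.pyRepeat [5] (PySem.Int.floordiv (counter.getD 'F' 0) 1)) := by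
  simp only [solveStep]
  rw [show pvLtd6.items.find? (fun p => p.2.length == 1) = some ('F', ([5] : PySem.Set Int)) from rfl]
  simp only []
  rw [show ((pvLtd6.getD 'F' []).headD 0 : Int) = 5 from rfl]
  rw [show PySem.List.pyGetD pvNames (5 : Int) "" = "FIVE" from rfl]
  rw [show PySem.Str.count "FIVE" (String.ofList ['F']) = 1 from rfl]
  rw [show "FIVE".toList = ['F', 'I', 'V', 'E'] from rfl]
  rw [PySem.List.foldl_prod_mk
      (f := fun (a : PySem.Dict Char Int) (c : Char) =>
        a.insert c (a.getD c 0 - PySem.Int.floordiv (counter.getD 'F' 0) ((1:Nat) : Int)))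
      (g := fun (b : PySem.Dict Char (PySem.Set Int)) (c : Char) =>
        if PySem.Set.contains (b.getD c []) (5 : Int)
        then b.insert c (PySem.Set.discard (b.getD c []) (5 : Int)) else b)]
  refine Prod.ext ?_ (Prod.ext ?_ ?_)
  · rfl
  · show List.foldl _ _ _ = pvLtd7
    decide
  · rfl

lemma pvStep7 (counter : PySem.Dict Char Int) (result : List Int) :
    solveStep pvNames (counter, pvLtd7, result) =
    (pvDec counter ['S', 'E', 'V', 'E', 'N'] (PySem.Int.floordiv (counter.getD 'V' 0) 1), pvLtd8,
      result ++ PySem.List.pyRepeat [7] (PySem.Int.floordiv (counter.getD 'V' 0) 1)) := by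
  simp only [solveStep]
  rw [show pvLtd7.items.find? (fun p => p.2.length == 1) = some ('V', ([7] : PySem.Set Int)) from rfl]
  simp only []
  rw [show ((pvLtd7.getD 'V' []).headD 0 : Int) = 7 from rfl]
  rw [show PySem.List.pyGetD pvNames (7 : Int) "" = "SEVEN" from rfl]
  rw [show PySem.Str.count "SEVEN" (String.ofList ['V']) = 1 from rfl]
  rw [show "SEVEN".toList = ['S', 'E', 'V', 'E', 'N'] from rfl]
  rw [PySem.List.foldl_prod_mk
      (f := fun (a : PySem.Dict Char Int) (c : Char) =>
        a.insert c (a.getD c 0 - PySem.Int.floordiv (counter.getD 'V' 0) ((1:Nat) : Int)))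
      (g := fun (b : PySem.Dict Char (PySem.Set Int)) (c : Char) =>
        if PySem.Set.contains (b.getD c []) (7 : Int)
        then b.insert c (PySem.Set.discard (b.getD c []) (7 : Int)) else b)]
  refine Prod.ext ?_ (Prod.ext ?_ ?_)
  · rfl
  · show List.foldl _ _ _ = pvLtd8
    decide
  · rfl

lemma pvStep8 (counter : PySem.Dict Char Int) (result : List Int) :
    solveStep pvNames (counter, pvLtd8, result) =
    (pvDec counter ['N', 'I', 'N', 'E'] (PySem.Int.floordiv (counter.getD 'E' 0) 1), pvLtd9,
      result ++ PySem.List.pyRepeat [9] (PySem.Int.floordiv (counter.getD 'E' 0) 1)) := by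
  simp only [solveStep]
  rw [show pvLtd8.items.find? (fun p => p.2.length == 1) = some ('E', ([9] : PySem.Set Int)) from rfl]
  simp only []
  rw [show ((pvLtd8.getD 'E' []).headD 0 : Int) = 9 from rfl]
  rw [show PySem.List.pyGetD pvNames (9 : Int) "" = "NINE" from rfl]
  rw [show PySem.Str.count "NINE" (String.ofList ['E']) = 1 from rfl]
  rw [show "NINE".toList = ['N', 'I', 'N', 'E'] from rfl]
  rw [PySem.List.foldl_prod_mk
      (f := fun (a : PySem.Dict Char Int) (c : Char) =>
        a.insert c (a.getD c 0 - PySem.Int.floordiv (counter.getD 'E' 0) ((1:Nat) : Int)))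
      (g := fun (b : PySem.Dict Char (PySem.Set Int)) (c : Char) =>
        if PySem.Set.contains (b.getD c []) (9 : Int)
        then b.insert c (PySem.Set.discard (b.getD c []) (9 : Int)) else b)]
  refine Prod.ext ?_ (Prod.ext ?_ ?_)
  · rfl
  · show List.foldl _ _ _ = pvLtd9
    decide
  · rfl

lemma pvStep9 (counter : PySem.Dict Char Int) (result : List Int) :
    solveStep pvNames (counter, pvLtd9, result) =
    (pvDec counter ['S', 'I', 'X'] (PySem.Int.floordiv (counter.getD 'I' 0) 1), pvLtd10,
      result ++ PySem.List.pyRepeat [6] (PySem.Int.floordiv (counter.getD 'I' 0) 1)) := by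
  simp only [solveStep]
  rw [show pvLtd9.items.find? (fun p => p.2.length == 1) = some ('I', ([6] : PySem.Set Int)) from rfl]
  simp only []
  rw [show ((pvLtd9.getD 'I' []).headD 0 : Int) = 6 from rfl]
  rw [show PySem.List.pyGetD pvNames (6 : Int) "" = "SIX" from rfl]
  rw [show PySem.Str.count "SIX" (String.ofList ['I']) = 1 from rfl]
  rw [show "SIX".toList = ['S', 'I', 'X'] from rfl]
  rw [PySem.List.foldl_prod_mk
      (f := fun (a : PySem.Dict Char Int) (c : Char) =>
        a.insert c (a.getD c 0 - PySem.Int.floordiv (counter.getD 'I' 0) ((1:Nat) : Int)))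
      (g := fun (b : PySem.Dict Char (PySem.Set Int)) (c : Char) =>
        if PySem.Set.contains (b.getD c []) (6 : Int)
        then b.insert c (PySem.Set.discard (b.getD c []) (6 : Int)) else b)]
  refine Prod.ext ?_ (Prod.ext ?_ ?_)
  · rfl
  · show List.foldl _ _ _ = pvLtd10
    decide
  · rfl

lemma pvLtdBuild :
    (PySem.List.enumerate pvNames 0).foldl
      (fun d p => p.2.toList.foldl
        (fun d c => d.modify c [] (fun st => PySem.Set.add st p.1)) d)
      PySem.Dict.empty = pvLtd0 := by
  set_option maxRecDepth 20000 in decide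

lemma pvFloor1 (a : Int) : PySem.Int.floordiv a 1 = a := by
  simp [PySem.Int.floordiv]

lemma pvGetD_pvDec (cs : List Char) (d : PySem.Dict Char Int) (k : Int) (c : Char) :
    (pvDec d cs k).getD c 0 = d.getD c 0 - (cs.count c) * k := by
  induction cs generalizing d with
  | nil => simp [pvDec]
  | cons x xs ih =>
    show (pvDec (d.insert x (d.getD x 0 - k)) xs k).getD c 0 = _
    rw [ih, PySem.Dict.getD_insert, List.count_cons]
    by_cases h : c = x
    · subst h; simp; ring
    · have hb : (x == c) = false := by simp [Ne.symm h]
      simp [h, hb]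

set_option maxHeartbeats 1000000 in
lemma pvSorted (n0 n1 n2 n3 n4 n5 n6 n7 n8 n9 : Nat) :
    PySem.List.sorted
      (List.replicate n0 (0:Int) ++ (List.replicate n2 2 ++ (List.replicate n4 4 ++ (List.replicate n3 3 ++
       (List.replicate n1 1 ++ (List.replicate n8 8 ++ (List.replicate n5 5 ++ (List.replicate n7 7 ++
       (List.replicate n9 9 ++ List.replicate n6 6))))))))) (fun x => x) false
    = List.replicate n0 0 ++ (List.replicate n1 1 ++ (List.replicate n2 2 ++ (List.replicate n3 3 ++
      (List.replicate n4 4 ++ (List.replicate n5 5 ++ (List.replicate n6 6 ++ (List.replicate n7 7 ++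
      (List.replicate n8 8 ++ List.replicate n9 9)))))))) := by
  apply PySem.List.sorted_id_eq_of_perm_of_pairwise
  · rw [← Multiset.coe_eq_coe]
    simp only [← Multiset.coe_add]
    abel
  · simp [List.pairwise_append, List.pairwise_replicate, List.mem_replicate, List.mem_append,
      and_imp]
    aesop

lemma pvJoinNilSep (L : List (List Char)) : PySem.Chars.join [] L = L.flatten := by
  induction L with
  | nil => rfl
  | cons x xs ih =>
    cases xs with
    | nil => simp [PySem.Chars.join, List.intercalate]
    | cons y ys => rw [PySem.Chars.join_cons_cons]; simp [ih]

lemma pvFlatRep (n : Nat) (c : Char) : (List.replicate n [c]).flatten = List.replicate n c := by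
  induction n with
  | zero => rfl
  | succ m ih => simp [List.replicate_succ, ih]

-- ===== VERDICT (by name: the statement is the Claim_ definition above) =====
set_option maxRecDepth 100000 in
set_option maxHeartbeats 4000000 in
theorem solve_spec : Claim_equal_solve := by
  intro s _
  unfold Spec_solve
  simp only [solve]
  rw [show (["ZERO","ONE","TWO","THREE","FOUR","FIVE","SIX","SEVEN","EIGHT","NINE"] : List String) = pvNames from rfl]
  rw [show PySem.List.pyRange 0 10 1 = [0,1,2,3,4,5,6,7,8,9] from rfl]
  simp only [pvLtdBuild, List.foldl_cons, List.foldl_nil, pvStep0, pvStep1, pvStep2, pvStep3, pvStep4,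
    pvStep5, pvStep6, pvStep7, pvStep8, pvStep9, pvFloor1, pvGetD_pvDec, PySem.Dict.getD_counter,
    List.count_cons, List.count_nil, PySem.List.pyRepeat_singleton]
  norm_num
  rw [pvSorted]
  simp only [List.map_append, List.map_replicate]
  rw [show PySem.Int.toStr 0 = "0" from rfl, show PySem.Int.toStr 1 = "1" from rfl,
      show PySem.Int.toStr 2 = "2" from rfl, show PySem.Int.toStr 3 = "3" from rfl,
      show PySem.Int.toStr 4 = "4" from rfl, show PySem.Int.toStr 5 = "5" from rfl,
      show PySem.Int.toStr 6 = "6" from rfl, show PySem.Int.toStr 7 = "7" from rfl,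
      show PySem.Int.toStr 8 = "8" from rfl, show PySem.Int.toStr 9 = "9" from rfl]
  simp only [solve_alt, PySem.Dict.getD_counter]
  rw [show PySem.List.pyRange 0 10 1 = [0,1,2,3,4,5,6,7,8,9] from rfl]
  simp only [List.map_cons, List.map_nil]
  rw [show PySem.Int.toChars 0 = ['0'] from rfl, show PySem.Int.toChars 1 = ['1'] from rfl,
      show PySem.Int.toChars 2 = ['2'] from rfl, show PySem.Int.toChars 3 = ['3'] from rfl,
      show PySem.Int.toChars 4 = ['4'] from rfl, show PySem.Int.toChars 5 = ['5'] from rfl,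
      show PySem.Int.toChars 6 = ['6'] from rfl, show PySem.Int.toChars 7 = ['7'] from rfl,
      show PySem.Int.toChars 8 = ['8'] from rfl, show PySem.Int.toChars 9 = ['9'] from rfl]
  simp only [PySem.List.pyRepeat_singleton]
  norm_num [PySem.List.pyGetD_ofNat']
  apply String.ext
  simp only [PySem.Str.toList_join]
  rw [show "".toList = ([]:List Char) from rfl]
  rw [pvJoinNilSep, pvJoinNilSep]
  simp only [List.map_append, List.map_replicate, List.map_cons, List.map_nil,
    List.flatten_append, List.flatten_cons, List.flatten_nil]
  rw [show "0".toList = ['0'] from rfl, show "1".toList = ['1'] from rfl,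
      show "2".toList = ['2'] from rfl, show "3".toList = ['3'] from rfl,
      show "4".toList = ['4'] from rfl, show "5".toList = ['5'] from rfl,
      show "6".toList = ['6'] from rfl, show "7".toList = ['7'] from rfl,
      show "8".toList = ['8'] from rfl, show "9".toList = ['9'] from rfl]
  simp only [pvFlatRep, List.append_nil, String.toList_ofList]
  refine (congrArg₂ (· ++ ·) ?_ (congrArg₂ (· ++ ·) ?_ (congrArg₂ (· ++ ·) ?_ (congrArg₂ (· ++ ·) ?_ (congrArg₂ (· ++ ·) ?_ (congrArg₂ (· ++ ·) ?_ (congrArg₂ (· ++ ·) ?_ (congrArg₂ (· ++ ·) ?_ (congrArg₂ (· ++ ·) ?_ ?_)))))))))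
  all_goals (congr 1 <;> omega)
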